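-- pv_equiv track=rewrite | github.com/hutengdai/language_2024 | alternation_learner_finnish.py | default_rules
-- ===== SOURCE A (Python) =====
-- def default_rules(combined_sr):
-- 	# Replacing all characters in abstract_segments_long and abstract_segments_short
-- 	for char in ['A']:
-- 		combined_sr = combined_sr.replace(char, 'ä')
-- 	for char in ['U']:
-- 		combined_sr = combined_sr.replace(char, 'y')
--
-- 	# Replace "-V" with "-" followed by the symbol immediately preceding "-"
-- 	i = 0
-- 	while i < len(combined_sr) - 1:
-- 		if combined_sr[i] == '-' and combined_sr[i + 1] == 'V':
-- 			if i > 0: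
-- 				preceding_symbol = combined_sr[i - 1]
-- 				combined_sr = combined_sr[:i] + '-' + preceding_symbol + combined_sr[i + 2:]
-- 			else:
-- 				# Handle edge case where '-' is the first character
-- 				i += 1
-- 				continue
-- 		i += 1
--
-- 	return combined_sr
-- ===== SOURCE B (Python) =====
-- def default_rules(combined_sr):
--     # Stack/worklist algorithm: pop chars off a stack, emit to an output list,
--     # and on a "-V" hit overwrite the stack top with the preceding emitted
--     # symbol so it gets re-scanned (this reproduces the cascade).
--     sub = {'A': '\u00e4', 'U': 'y'}
--     stack = [sub.get(c, c) for c in reversed(combined_sr)]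
--     out = []
--     while stack:
--         c = stack.pop()
--         out.append(c)
--         if c == '-' and stack and stack[-1] == 'V' and len(out) >= 2:
--             stack[-1] = out[-2]
--     return ''.join(out)
-- ===== Notes on version B (the rewrite author's own statement) =====
-- stated objective: alternative
-- what changed: A scans with an index and rebuilds the whole string by slicing+concatenation at every '-V' hit; B is a stack/worklist algorithm: it pops characters off a stack, appends them to an output list, and on a '-V' hit overwrites the stack top with the preceding emitted symbol so it is re-scanned.
import Mathlib
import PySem

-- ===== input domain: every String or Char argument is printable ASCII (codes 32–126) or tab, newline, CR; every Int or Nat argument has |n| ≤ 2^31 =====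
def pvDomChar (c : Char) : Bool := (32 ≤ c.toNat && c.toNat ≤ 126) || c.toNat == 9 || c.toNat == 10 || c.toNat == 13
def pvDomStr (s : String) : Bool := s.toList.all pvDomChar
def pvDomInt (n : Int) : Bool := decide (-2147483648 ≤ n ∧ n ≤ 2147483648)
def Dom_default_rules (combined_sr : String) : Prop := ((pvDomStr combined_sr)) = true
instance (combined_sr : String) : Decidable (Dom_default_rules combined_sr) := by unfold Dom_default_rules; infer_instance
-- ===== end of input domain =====

-- B replaces A's index-and-slice while loop by a stack/worklist scan with an output
-- accumulator (pop, emit, push the preceding symbol back on a "-V" hit); same return value.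

-- ===== PORT A =====
-- A's while loop, step for step.  Indices i, i+1, i-1 are all in range where used
-- (0 < i, i+1 < length), so s[k] is ported exactly as getD; s[:i] / s[i+2:] are
-- take i / drop (i+2) (i ≥ 0).  The rewritten string keeps its length, so the loop
-- runs at most (length) times: fuel = length is exact, never exhausted early.
def drLoopA (fuel : Nat) (s : List Char) (i : Nat) : List Char :=
  match fuel with
  | 0 => s
  | fuel + 1 =>
    if i + 1 < s.length then
      if s.getD i ' ' = '-' ∧ s.getD (i + 1) ' ' = 'V' then
        if 0 < i then
          drLoopA fuel (s.take i ++ '-' :: s.getD (i - 1) ' ' :: s.drop (i + 2)) (i + 1)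
        else
          -- '-' is the first character: skip (i += 1; continue)
          drLoopA fuel s (i + 1)
      else drLoopA fuel s (i + 1)
    else s

def default_rules (combined_sr : String) : String :=
  let s1 := PySem.Str.replace combined_sr "A" "ä"
  let s2 := PySem.Str.replace s1 "U" "y"
  let cs := s2.toList
  String.ofList (drLoopA cs.length cs 0)

-- ===== PORT B =====
-- Source B's per-char substitution sub.get(c, c)
def drSub (c : Char) : Char := if c = 'A' then 'ä' else if c = 'U' then 'y' else c

-- Source B's while loop.  Python's list with pop()/[-1] at the END is modeled as a Lean
-- list with the top at the HEAD (Source B builds the stack from the reversed input, so the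
-- head-first list below holds the chars in original order, exactly the pop order).
-- out.append / out[-2] become a reversed accumulator rout (head = last emitted):
-- after appending c, len(out) >= 2 ⟺ rout ≠ [] before the cons, and out[-2] = rout.head.
def drGoB (stack rout : List Char) : List Char :=
  match stack with
  | [] => rout.reverse
  | c :: rest =>
    if c = '-' ∧ rest.headD ' ' = 'V' ∧ rest ≠ [] ∧ rout ≠ [] then
      drGoB (rout.headD ' ' :: rest.tail) (c :: rout)
    else drGoB rest (c :: rout)
termination_by stack.length
decreasing_by
  · have : rest ≠ [] := by tauto
    cases rest with
    | nil => simp at this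
    | cons a t => simp
  · simp

def default_rules_alt (combined_sr : String) : String :=
  String.ofList (drGoB (combined_sr.toList.map drSub) [])

-- ===== PRECONDITION & SPEC =====
def Spec_default_rules (combined_sr : String) (out : String) : Prop := out = default_rules_alt combined_sr
instance (combined_sr : String) (out : String) : Decidable (Spec_default_rules combined_sr out) := by unfold Spec_default_rules; infer_instance

-- ===== CLAIM (what is proved, stated in full; the proofs are below) =====
def Claim_equal_default_rules : Prop := ∀ (combined_sr : String), Dom_default_rules combined_sr → Spec_default_rules combined_sr (default_rules combined_sr)

-- ===== LEMMAS AND PROOFS =====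

-- single-character str.replace is a map
lemma replace_go_single (a b : Char) :
    ∀ (l acc : List Char) (fuel : Nat), l.length ≤ fuel →
      PySem.Chars.replace.go [a] [b] fuel l acc
        = acc.reverse ++ l.map (fun c => if c = a then b else c) := by
  intro l
  induction l with
  | nil =>
      intro acc fuel _
      cases fuel <;> simp [PySem.Chars.replace.go]
  | cons c t ih =>
      intro acc fuel hf
      cases fuel with
      | zero => simp at hf
      | succ fuel =>
        have ht : t.length ≤ fuel := by simpa using hf
        by_cases hc : c = a
        · subst hc
          simp [PySem.Chars.replace.go, List.isPrefixOf, ih _ _ ht]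
        · simp [PySem.Chars.replace.go, List.isPrefixOf, hc, ih _ _ ht]
          exact fun h => (hc h.symm).elim

lemma replace_single (a b : Char) (l : List Char) :
    PySem.Chars.replace l [a] [b] = l.map (fun c => if c = a then b else c) := by
  simp [PySem.Chars.replace, replace_go_single a b l [] l.length le_rfl]

lemma subst_eq (s : String) :
    (PySem.Str.replace (PySem.Str.replace s "A" "ä") "U" "y").toList
      = s.toList.map drSub := by
  simp only [PySem.Str.toList_replace]
  have hA : ("A" : String).toList = ['A'] := by decide
  have ha : ("ä" : String).toList = ['ä'] := by decide
  have hU : ("U" : String).toList = ['U'] := by decide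
  have hy : ("y" : String).toList = ['y'] := by decide
  rw [hA, ha, hU, hy, replace_single, replace_single, List.map_map]
  apply List.map_congr_left
  intro c _
  by_cases h1 : c = 'A' <;> by_cases h2 : c = 'U' <;>
    simp_all [drSub, Function.comp]

-- A's loop at index i equals B's stack scan with stack = the unread suffix and
-- rout = the prefix already decided (reversed).
lemma loopA_eq_goB : ∀ (fuel : Nat) (s : List Char) (i : Nat),
    i ≤ s.length → s.length ≤ fuel + i →
    drLoopA fuel s i = drGoB (s.drop i) ((s.take i).reverse) := by
  intro fuel
  induction fuel with
  | zero =>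
      intro s i hi hlen
      have : i = s.length := by omega
      subst this
      simp [drLoopA, drGoB]
  | succ fuel ih =>
      intro s i hi hlen
      by_cases hlt : i + 1 < s.length
      · have hi' : i < s.length := by omega
        have hdrop : s.drop i = s[i] :: s.drop (i + 1) := List.drop_eq_getElem_cons hi'
        have hrest : s.drop (i + 1) ≠ [] := by
          simp [List.drop_eq_nil_iff]; omega
        have hhead : (s.drop (i + 1)).headD ' ' = s.getD (i + 1) ' ' := by
          rw [List.drop_eq_getElem_cons hlt, List.getD_eq_getElem s ' ' hlt]
          rfl
        rw [hdrop, drLoopA, if_pos hlt, drGoB]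
        by_cases hcond : s.getD i ' ' = '-' ∧ s.getD (i + 1) ' ' = 'V'
        · rw [if_pos hcond]
          have hci : s[i] = '-' := by
            rw [← List.getD_eq_getElem s ' ' hi']; exact hcond.1
          by_cases hpos : 0 < i
          · have hroutne : (s.take i).reverse ≠ [] := by
              have hl : (s.take i).reverse.length = i := by simp; omega
              intro h
              rw [h] at hl
              simp at hl
              omega
            rw [if_pos hpos, if_pos ⟨hci, by rw [hhead]; exact hcond.2, hrest, hroutne⟩]
            set s' := s.take i ++ '-' :: s.getD (i - 1) ' ' :: s.drop (i + 2) with hs'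
            have htlen : (s.take i).length = i := by simp; omega
            have hslen : s'.length = s.length := by
              rw [hs']; simp only [List.length_append, List.length_cons, List.length_drop, htlen]
              omega
            rw [ih s' (i + 1) (by rw [hslen]; omega) (by rw [hslen]; omega)]
            have hstack : s'.drop (i + 1) = s.getD (i - 1) ' ' :: s.drop (i + 2) := by
              rw [hs', show i + 1 = (s.take i).length + 1 from by rw [htlen],
                List.drop_append]
              simp
            have hrout : s'.take (i + 1) = s.take i ++ ['-'] := by
              rw [hs', show i + 1 = (s.take i).length + 1 from by rw [htlen],
                List.take_append]
              simp
            have hprev : (s.take i).reverse.headD ' ' = s.getD (i - 1) ' ' := by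
              have hlt' : i - 1 < (s.take i).length := by omega
              rw [List.headD_eq_head?_getD, List.head?_reverse,
                List.getLast?_eq_getElem?, htlen,
                List.getElem?_eq_getElem hlt', List.getElem_take,
                List.getD_eq_getElem s ' ' (by omega : i - 1 < s.length)]
              rfl
            have htail : (s.drop (i + 1)).tail = s.drop (i + 2) := by
              rw [List.tail_drop]
            rw [hstack, hrout, hprev, htail, List.reverse_append]
            simp [hci]
          · have : i = 0 := by omega
            subst this
            rw [if_neg hpos, if_neg (by simp)]
            rw [ih s 1 (by omega) (by omega)]
            congr 1
            rw [List.take_add_one]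
            simp [List.getElem?_eq_getElem hi']
        · rw [if_neg hcond]
          have : ¬ (s[i] = '-' ∧ (s.drop (i+1)).headD ' ' = 'V' ∧ s.drop (i+1) ≠ [] ∧ (s.take i).reverse ≠ []) := by
            rw [hhead]
            intro ⟨h1, h2, _, _⟩
            exact hcond ⟨by rw [List.getD_eq_getElem s ' ' hi']; exact h1, h2⟩
          rw [if_neg this, ih s (i + 1) (by omega) (by omega)]
          congr 1
          rw [List.take_add_one]
          simp [List.getElem?_eq_getElem hi']
      · -- i+1 ≥ len: A stops; B pops at most the final char and emits it unchanged
        rw [drLoopA, if_neg hlt]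
        rcases (by omega : i = s.length ∨ i + 1 = s.length) with h | h
        · subst h; simp [drGoB]
        · have hi' : i < s.length := by omega
          rw [List.drop_eq_getElem_cons hi', drGoB]
          have hrest : s.drop (i + 1) = [] := by simp [List.drop_eq_nil_iff]; omega
          rw [if_neg (by simp [hrest])]
          rw [hrest, drGoB]
          simp only [List.reverse_cons, List.reverse_reverse]
          rw [show List.take i s ++ [s[i]] = List.take (i + 1) s from by
                rw [List.take_add_one]; simp [List.getElem?_eq_getElem hi'],
            h, List.take_length]

-- ===== VERDICT (by name: the statement is the Claim_ definition above) =====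
theorem default_rules_spec : Claim_equal_default_rules := by
  intro s _
  unfold Spec_default_rules default_rules default_rules_alt
  simp only [subst_eq]
  apply congrArg String.ofList
  rw [loopA_eq_goB _ _ 0 (by omega) (by omega)]
  simp
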